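-- pv_equiv track=rewrite | github.com/AchiZ48/OOP-Project | tools/generate_uml.py | find_class_body
-- ===== SOURCE A (Python) =====
-- from typing import Dict, List, Optional, Tuple
--
-- def find_class_body(clean_text: str, start_index: int) -> Tuple[str, int]:
--     brace_index = clean_text.find("{", start_index)
--     if brace_index == -1:
--         return "", -1
--     depth = 1
--     i = brace_index + 1
--     while i < len(clean_text) and depth > 0:
--         ch = clean_text[i]
--         if ch == "{":
--             depth += 1
--         elif ch == "}":
--             depth -= 1
--         i += 1
--     end_index = i
--     body = clean_text[brace_index + 1 : end_index - 1]
--     return body, end_index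
-- ===== SOURCE B (Python) =====
-- def find_class_body(clean_text: str, start_index: int):
--     brace_index = clean_text.find("{", start_index)
--     if brace_index == -1:
--         return "", -1
--     depth = 1
--     i = brace_index + 1
--     while depth > 0:
--         next_open = clean_text.find("{", i)
--         next_close = clean_text.find("}", i)
--         if next_open == -1 and next_close == -1:
--             i = len(clean_text)
--             break
--         if next_open != -1 and (next_close == -1 or next_open < next_close):
--             depth += 1
--             i = next_open + 1
--         else:
--             depth -= 1
--             i = next_close + 1
--     end_index = i
--     return clean_text[brace_index + 1 : end_index - 1], end_index
-- ===== Notes on version B (the rewrite author's own statement) =====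
-- stated objective: alternative
-- what changed: A scans the text one character at a time updating the brace depth; B jumps directly between successive brace positions using str.find for '{' and '}', touching only the braces.
import Mathlib
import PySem

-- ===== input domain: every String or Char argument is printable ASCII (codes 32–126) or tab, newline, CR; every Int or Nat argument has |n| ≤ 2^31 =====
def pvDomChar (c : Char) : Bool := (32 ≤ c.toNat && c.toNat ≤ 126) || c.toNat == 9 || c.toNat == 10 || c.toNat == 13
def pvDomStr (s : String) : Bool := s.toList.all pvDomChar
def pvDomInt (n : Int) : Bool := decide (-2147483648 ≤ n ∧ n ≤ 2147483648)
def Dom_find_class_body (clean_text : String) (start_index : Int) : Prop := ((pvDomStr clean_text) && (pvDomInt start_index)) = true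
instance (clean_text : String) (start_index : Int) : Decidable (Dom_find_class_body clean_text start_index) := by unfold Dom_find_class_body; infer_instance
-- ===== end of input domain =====

-- B replaces A's character-by-character scan with a loop that jumps between successive
-- brace positions via find(...) (objective: alternative traversal; same result proved equal).

-- ===== PORT A =====
-- A's while loop: i advances one character at a time, depth tracks brace nesting.
def pvLoopA (cs : List Char) (depth : Int) (i : Nat) : Nat :=
  if h : i < cs.length ∧ 0 < depth then
    let ch := cs[i]'h.1
    pvLoopA cs (if ch = '{' then depth + 1 else if ch = '}' then depth - 1 else depth) (i + 1)
  else i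
termination_by cs.length - i
decreasing_by omega

def find_class_body (clean_text : String) (start_index : Int) : String × Int :=
  let brace_index := PySem.Str.findFrom clean_text "{" start_index none
  if brace_index = -1 then ("", -1)
  else
    let end_index : Int := (pvLoopA clean_text.toList 1 (brace_index.toNat + 1) : Nat)
    (PySem.Str.slice clean_text (some (brace_index + 1)) (some (end_index - 1)), end_index)

-- ===== PORT B =====
-- termination helper for pvLoopB: a non-(-1) result of findFrom for a one-char needle
-- is an index < length, and at least the (nonnegative) start
theorem pvFindAux (cs : List Char) (c : Char) (s' : Int) (h0 : 0 ≤ s')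
    (hn : s' ≤ (cs.length : Int))
    (h : PySem.Chars.find (List.drop s'.toNat (List.take ((cs.length : Int)).toNat cs)) [c] ≠ -1) :
    0 ≤ PySem.Chars.find (List.drop s'.toNat (List.take ((cs.length : Int)).toNat cs)) [c] ∧
      (s' + PySem.Chars.find (List.drop s'.toNat (List.take ((cs.length : Int)).toNat cs)) [c]).toNat
        < cs.length := by
  have ht : List.take ((cs.length : Int)).toNat cs = cs := by simp
  rw [ht] at h ⊢
  have hr0 : 0 ≤ PySem.Chars.find (List.drop s'.toNat cs) [c] := by
    have := PySem.Chars.neg_one_le_find (List.drop s'.toNat cs) [c]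
    omega
  have hpre := (PySem.Chars.find_spec (s := List.drop s'.toNat cs) (sub := [c]) hr0).1
  have hlt : (PySem.Chars.find (List.drop s'.toNat cs) [c]).toNat < (List.drop s'.toNat cs).length := by
    by_contra hge
    have hnil : List.drop (PySem.Chars.find (List.drop s'.toNat cs) [c]).toNat (List.drop s'.toNat cs) = [] :=
      List.drop_eq_nil_of_le (by omega)
    rw [hnil] at hpre
    simp at hpre
  rw [List.length_drop] at hlt
  exact ⟨hr0, by omega⟩

theorem pvFindBounds (cs : List Char) (c : Char) (st : Int)
    (h : PySem.Chars.findFrom cs [c] st none ≠ -1) :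
    st ≤ PySem.Chars.findFrom cs [c] st none ∧ 0 ≤ PySem.Chars.findFrom cs [c] st none ∧
      (PySem.Chars.findFrom cs [c] st none).toNat < cs.length := by
  simp only [PySem.Chars.findFrom] at h ⊢
  split_ifs at h ⊢ <;> try exact absurd rfl h
  · obtain ⟨h1, h2⟩ := pvFindAux cs c 0 le_rfl (by omega) (by assumption)
    exact ⟨by omega, by omega, h2⟩
  · obtain ⟨h1, h2⟩ := pvFindAux cs c (st + (cs.length : Int)) (by omega) (by omega) (by assumption)
    exact ⟨by omega, by omega, h2⟩
  · obtain ⟨h1, h2⟩ := pvFindAux cs c st (by omega) (by omega) (by assumption)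
    exact ⟨by omega, by omega, h2⟩

-- the jump loop of B: move straight to the next '{' or '}', whichever is nearer
def pvLoopB (cs : List Char) (depth : Int) (i : Nat) : Nat :=
  if 0 < depth then
    let no := PySem.Chars.findFrom cs ['{'] (i : Int) none
    let nc := PySem.Chars.findFrom cs ['}'] (i : Int) none
    if h1 : no = -1 ∧ nc = -1 then cs.length
    else if h2 : no ≠ -1 ∧ (nc = -1 ∨ no < nc) then pvLoopB cs (depth + 1) (no.toNat + 1)
    else pvLoopB cs (depth - 1) (nc.toNat + 1)
  else i
termination_by cs.length + 1 - i
decreasing_by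
  · have := pvFindBounds cs '{' (i : Int) h2.1
    omega
  · have hnc : nc ≠ -1 := by
      by_cases hno : no = -1
      · tauto
      · rcases not_and_or.mp h2 with h | h
        · exact absurd hno h
        · intro hc; exact h (Or.inl hc)
    have := pvFindBounds cs '}' (i : Int) hnc
    omega

def find_class_body_alt (clean_text : String) (start_index : Int) : String × Int :=
  let brace_index := PySem.Str.findFrom clean_text "{" start_index none
  if brace_index = -1 then ("", -1)
  else
    let end_index : Int := (pvLoopB clean_text.toList 1 (brace_index.toNat + 1) : Nat)
    (PySem.Str.slice clean_text (some (brace_index + 1)) (some (end_index - 1)), end_index)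

-- ===== PRECONDITION & SPEC =====
def Spec_find_class_body (clean_text : String) (start_index : Int) (out : String × Int) : Prop := out = find_class_body_alt clean_text start_index
instance (clean_text : String) (start_index : Int) (out : String × Int) : Decidable (Spec_find_class_body clean_text start_index out) := by unfold Spec_find_class_body; infer_instance

-- ===== CLAIM (what is proved, stated in full; the proofs are below) =====
def Claim_equal_find_class_body : Prop := ∀ (clean_text : String) (start_index : Int), Dom_find_class_body clean_text start_index → Spec_find_class_body clean_text start_index (find_class_body clean_text start_index)

-- ===== LEMMAS AND PROOFS =====

-- [c] is a prefix of cs.drop p exactly when cs[p]? = some c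
theorem pvSingletonPrefix (cs : List Char) (c : Char) (p : Nat) :
    [c] <+: cs.drop p ↔ cs[p]? = some c := by
  have h0 : cs[p]? = (cs.drop p)[0]? := by simp [List.getElem?_drop]
  rw [h0]
  cases cs.drop p with
  | nil => simp
  | cons a t =>
    simp only [List.getElem?_cons_zero, Option.some.injEq]
    constructor
    · rintro ⟨u, hu⟩
      simp at hu
      exact hu.1.symm
    · rintro rfl
      exact ⟨t, rfl⟩

-- non-(-1) findFrom at a Nat start i ≤ len: first occurrence characterization via getElem?
theorem pvFindPos (cs : List Char) (c : Char) (i : Nat) (hi : i ≤ cs.length)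
    (h : PySem.Chars.findFrom cs [c] (i : Int) none ≠ -1) :
    (i : Int) ≤ PySem.Chars.findFrom cs [c] (i : Int) none ∧
    (PySem.Chars.findFrom cs [c] (i : Int) none).toNat < cs.length ∧
    cs[(PySem.Chars.findFrom cs [c] (i : Int) none).toNat]? = some c ∧
    (∀ q : Nat, i ≤ q → q < (PySem.Chars.findFrom cs [c] (i : Int) none).toNat → cs[q]? ≠ some c) := by
  obtain ⟨h1, h2, h3⟩ := PySem.Chars.findFrom_natCast_spec cs [c] i hi h
  obtain ⟨-, -, hlen⟩ := pvFindBounds cs c (i : Int) h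
  exact ⟨h1, hlen, (pvSingletonPrefix _ _ _).mp h2,
    fun q hq1 hq2 hq3 => h3 q hq1 hq2 ((pvSingletonPrefix _ _ _).mpr hq3)⟩

-- findFrom = -1 at a Nat start i ≤ len: no occurrence at any position ≥ i
theorem pvFindNone (cs : List Char) (c : Char) (i : Nat) (hi : i ≤ cs.length)
    (h : PySem.Chars.findFrom cs [c] (i : Int) none = -1) :
    ∀ q : Nat, i ≤ q → q < cs.length → cs[q]? ≠ some c := by
  have hni := (PySem.Chars.findFrom_natCast_eq_neg_one_iff cs [c] i hi).mp h
  intro q hq1 hq2 hq3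
  apply hni
  rw [List.singleton_infix_iff]
  have : (cs.drop i)[q - i]? = some c := by
    rw [List.getElem?_drop]
    rwa [Nat.add_sub_cancel' hq1]
  exact List.mem_of_getElem? this

-- A's scan runs to the end when no brace occurs at or after i
theorem pvScanEnd (cs : List Char) (d : Int) (i : Nat) (hi : i ≤ cs.length) (hd : 0 < d)
    (hq : ∀ q, i ≤ q → q < cs.length → cs[q]? ≠ some '{' ∧ cs[q]? ≠ some '}') :
    pvLoopA cs d i = cs.length := by
  rw [pvLoopA]
  by_cases hlt : i < cs.length
  · rw [dif_pos ⟨hlt, hd⟩]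
    have hg : cs[i]? = some (cs[i]'hlt) := List.getElem?_eq_getElem hlt
    obtain ⟨ho, hc⟩ := hq i le_rfl hlt
    have h1 : ¬ cs[i]'hlt = '{' := fun he => ho (by rw [hg, he])
    have h2 : ¬ cs[i]'hlt = '}' := fun he => hc (by rw [hg, he])
    simp only [h1, h2, if_false]
    exact pvScanEnd cs d (i + 1) hlt hd (fun q hq1 hq2 => hq q (by omega) hq2)
  · rw [dif_neg (by tauto)]
    omega
termination_by cs.length - i

-- A's scan skips brace-free stretches without changing depth
theorem pvScanSkip (cs : List Char) (d : Int) (i j : Nat) (hij : i ≤ j) (hj : j ≤ cs.length)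
    (hd : 0 < d)
    (hq : ∀ q, i ≤ q → q < j → cs[q]? ≠ some '{' ∧ cs[q]? ≠ some '}') :
    pvLoopA cs d i = pvLoopA cs d j := by
  rcases eq_or_lt_of_le hij with rfl | hlt
  · rfl
  · have hilen : i < cs.length := by omega
    rw [pvLoopA, dif_pos ⟨hilen, hd⟩]
    have hg : cs[i]? = some (cs[i]'hilen) := List.getElem?_eq_getElem hilen
    obtain ⟨ho, hc⟩ := hq i le_rfl hlt
    have h1 : ¬ cs[i]'hilen = '{' := fun he => ho (by rw [hg, he])
    have h2 : ¬ cs[i]'hilen = '}' := fun he => hc (by rw [hg, he])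
    simp only [h1, h2, if_false]
    exact pvScanSkip cs d (i + 1) j hlt hj hd (fun q hq1 hq2 => hq q (by omega) hq2)
termination_by j - i

-- one scan step at a brace position
theorem pvScanStep (cs : List Char) (d : Int) (p : Nat) (hp : p < cs.length) (hd : 0 < d)
    (c : Char) (hc : cs[p]? = some c) :
    pvLoopA cs d p =
      pvLoopA cs (if c = '{' then d + 1 else if c = '}' then d - 1 else d) (p + 1) := by
  rw [pvLoopA, dif_pos ⟨hp, hd⟩]
  have : cs[p]'hp = c := by
    have := List.getElem?_eq_getElem hp
    rw [hc] at this
    exact (Option.some_injective _ this.symm)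
  rw [this]

-- the central equivalence: A's character scan equals B's brace-to-brace jumps
theorem pvLoopEq (cs : List Char) (d : Int) (i : Nat) (hi : i ≤ cs.length) :
    pvLoopA cs d i = pvLoopB cs d i := by
  rw [pvLoopB]
  by_cases hd : 0 < d
  · rw [if_pos hd]
    by_cases h1 : PySem.Chars.findFrom cs ['{'] (i : Int) none = -1 ∧
        PySem.Chars.findFrom cs ['}'] (i : Int) none = -1
    · rw [dif_pos h1]
      exact pvScanEnd cs d i hi hd (fun q hq1 hq2 =>
        ⟨pvFindNone cs '{' i hi h1.1 q hq1 hq2, pvFindNone cs '}' i hi h1.2 q hq1 hq2⟩)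
    · rw [dif_neg h1]
      by_cases h2 : PySem.Chars.findFrom cs ['{'] (i : Int) none ≠ -1 ∧
          (PySem.Chars.findFrom cs ['}'] (i : Int) none = -1 ∨
            PySem.Chars.findFrom cs ['{'] (i : Int) none <
              PySem.Chars.findFrom cs ['}'] (i : Int) none)
      · rw [dif_pos h2]
        obtain ⟨hle, hlen, hat, hmin⟩ := pvFindPos cs '{' i hi h2.1
        set p := (PySem.Chars.findFrom cs ['{'] (i : Int) none).toNat with hpdef
        have hip : i ≤ p := by omega
        have hnoc : ∀ q, i ≤ q → q < p → cs[q]? ≠ some '{' ∧ cs[q]? ≠ some '}' := by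
          intro q hq1 hq2
          refine ⟨hmin q hq1 hq2, ?_⟩
          rcases h2.2 with hcn | hlt
          · exact pvFindNone cs '}' i hi hcn q hq1 (by omega)
          · obtain ⟨-, -, -, hminC⟩ := pvFindPos cs '}' i hi (by omega)
            exact hminC q hq1 (by omega)
        rw [pvScanSkip cs d i p hip (by omega) hd hnoc,
          pvScanStep cs d p hlen hd '{' hat,
          show (if ('{' : Char) = '{' then d + 1 else if ('{' : Char) = '}' then d - 1 else d) = d + 1
            from if_pos rfl]
        exact pvLoopEq cs (d + 1) (p + 1) (by omega)
      · rw [dif_neg h2]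
        have hnc : PySem.Chars.findFrom cs ['}'] (i : Int) none ≠ -1 := by
          intro hc
          rcases not_and_or.mp h2 with h | h
          · exact h1 ⟨not_not.mp h, hc⟩
          · exact h (Or.inl hc)
        obtain ⟨hle, hlen, hat, hmin⟩ := pvFindPos cs '}' i hi hnc
        set p := (PySem.Chars.findFrom cs ['}'] (i : Int) none).toNat with hpdef
        have hip : i ≤ p := by omega
        have hnoc : ∀ q, i ≤ q → q < p → cs[q]? ≠ some '{' ∧ cs[q]? ≠ some '}' := by
          intro q hq1 hq2
          refine ⟨?_, hmin q hq1 hq2⟩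
          by_cases hno : PySem.Chars.findFrom cs ['{'] (i : Int) none = -1
          · exact pvFindNone cs '{' i hi hno q hq1 (by omega)
          · obtain ⟨hleO, hlenO, hatO, hminO⟩ := pvFindPos cs '{' i hi hno
            have hne : (PySem.Chars.findFrom cs ['{'] (i : Int) none).toNat ≠ p := by
              intro he
              rw [he] at hatO
              rw [hatO] at hat
              simp at hat
            have : ¬ (PySem.Chars.findFrom cs ['{'] (i : Int) none <
                PySem.Chars.findFrom cs ['}'] (i : Int) none) := by
              intro hlt; exact h2 ⟨hno, Or.inr hlt⟩
            exact hminO q hq1 (by omega)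
        rw [pvScanSkip cs d i p hip (by omega) hd hnoc,
          pvScanStep cs d p hlen hd '}' hat,
          show (if ('}' : Char) = '{' then d + 1 else if ('}' : Char) = '}' then d - 1 else d) = d - 1
            from by rw [if_neg (by decide), if_pos rfl]]
        exact pvLoopEq cs (d - 1) (p + 1) (by omega)
  · rw [if_neg hd, pvLoopA, dif_neg (by tauto)]
termination_by cs.length + 1 - i
decreasing_by
  · omega
  · omega

-- ===== VERDICT (by name: the statement is the Claim_ definition above) =====
theorem find_class_body_spec : Claim_equal_find_class_body := by
  intro clean_text start_index _
  unfold Spec_find_class_body find_class_body find_class_body_alt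
  rw [PySem.Str.findFrom_eq]
  rw [show ("{" : String).toList = ['{'] from rfl]
  by_cases hb : PySem.Chars.findFrom clean_text.toList ['{'] start_index none = -1
  · rw [if_pos hb, if_pos hb]
  · rw [if_neg hb, if_neg hb,
      pvLoopEq clean_text.toList 1 _ (by
        obtain ⟨-, -, hlen⟩ := pvFindBounds clean_text.toList '{' start_index hb
        omega)]
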